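-- pv_equiv track=rewrite | github.com/elwlwlwk/GeneSeq2Taxonomy | extract_agtc_feature.py | calc_z_curve
-- ===== SOURCE A (Python) =====
-- def calc_z_curve(sequence):
-- 	an=[]
-- 	gn=[]
-- 	tn=[]
-- 	cn=[]
-- 	for base in sequence:
-- 		an.append(0)
-- 		gn.append(0)
-- 		tn.append(0)
-- 		cn.append(0)
-- 		if base=="A":
-- 			an[-1]=1
-- 		elif base=="T":
-- 			tn[-1]=1
-- 		elif base=="G":
-- 			gn[-1]=1
-- 		elif base=="C":
-- 			cn[-1]=1
-- 	return [an , gn, tn, cn]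
-- ===== SOURCE B (Python) =====
-- def calc_z_curve(sequence):
--     rows = [[1 if base == c else 0 for c in "AGTC"] for base in sequence]
--     if not rows:
--         return [[], [], [], []]
--     return [list(col) for col in zip(*rows)]
-- ===== Notes on version B (the rewrite author's own statement) =====
-- stated objective: alternative
-- what changed: B builds one one-hot row per base over the fixed order AGTC and transposes the row list with zip(*rows), instead of A's single loop maintaining four parallel accumulator lists with append-then-set-last updates.
import Mathlib
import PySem

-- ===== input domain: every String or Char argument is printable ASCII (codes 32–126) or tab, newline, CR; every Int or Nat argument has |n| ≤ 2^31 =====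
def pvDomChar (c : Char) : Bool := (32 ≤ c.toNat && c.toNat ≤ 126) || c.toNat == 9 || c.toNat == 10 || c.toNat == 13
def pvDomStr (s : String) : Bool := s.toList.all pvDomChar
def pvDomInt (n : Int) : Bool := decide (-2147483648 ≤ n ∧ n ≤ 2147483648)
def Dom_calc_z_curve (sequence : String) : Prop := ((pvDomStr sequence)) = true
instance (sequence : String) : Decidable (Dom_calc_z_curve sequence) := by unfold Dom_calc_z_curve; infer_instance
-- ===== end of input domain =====

-- B rebuilds the same output by per-base one-hot rows over "AGTC" followed by a transpose,
-- a different decomposition of A's four parallel accumulator lists (objective: alternative).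


-- ===== PORT A =====
-- loop body: append 0 to each list, then set the last element of the matching list to 1
def pvStepA (st : List Int × List Int × List Int × List Int) (base : Char) :
    List Int × List Int × List Int × List Int :=
  let an := st.1 ++ [0]
  let gn := st.2.1 ++ [0]
  let tn := st.2.2.1 ++ [0]
  let cn := st.2.2.2 ++ [0]
  if base == 'A' then (an.dropLast ++ [1], gn, tn, cn)
  else if base == 'T' then (an, gn, tn.dropLast ++ [1], cn)
  else if base == 'G' then (an, gn.dropLast ++ [1], tn, cn)
  else if base == 'C' then (an, gn, tn, cn.dropLast ++ [1])
  else (an, gn, tn, cn)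

def calc_z_curve (sequence : String) : List (List Int) :=
  let st := sequence.toList.foldl pvStepA ([], [], [], [])
  [st.1, st.2.1, st.2.2.1, st.2.2.2]

-- ===== PORT B =====
-- hand port of zip(*rows) for rows of length 4 (exact: every row built by B has length 4,
-- and Python's zip over equal-length rows is exactly this 4-way unzip)
def pvUnzip4 : List (List Int) → List Int × List Int × List Int × List Int
  | [] => ([], [], [], [])
  | r :: rest =>
    let (as_, gs, ts, cs) := pvUnzip4 rest
    (r.getD 0 0 :: as_, r.getD 1 0 :: gs, r.getD 2 0 :: ts, r.getD 3 0 :: cs)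

def calc_z_curve_alt (sequence : String) : List (List Int) :=
  let rows := sequence.toList.map (fun base =>
    "AGTC".toList.map (fun c => if base == c then (1 : Int) else 0))
  if rows = [] then [[], [], [], []]
  else
    let cols := pvUnzip4 rows
    [cols.1, cols.2.1, cols.2.2.1, cols.2.2.2]

-- ===== PRECONDITION & SPEC =====
def Spec_calc_z_curve (sequence : String) (out : List (List Int)) : Prop := out = calc_z_curve_alt sequence
instance (sequence : String) (out : List (List Int)) : Decidable (Spec_calc_z_curve sequence out) := by unfold Spec_calc_z_curve; infer_instance

-- ===== CLAIM (what is proved, stated in full; the proofs are below) =====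
def Claim_equal_calc_z_curve : Prop := ∀ (sequence : String), Dom_calc_z_curve sequence → Spec_calc_z_curve sequence (calc_z_curve sequence)

-- ===== LEMMAS AND PROOFS =====

def pvInd (x : Char) (b : Char) : Int := if b == x then 1 else 0

theorem pvStepA_eq (st : List Int × List Int × List Int × List Int) (b : Char) :
    pvStepA st b = (st.1 ++ [pvInd 'A' b], st.2.1 ++ [pvInd 'G' b],
                    st.2.2.1 ++ [pvInd 'T' b], st.2.2.2 ++ [pvInd 'C' b]) := by
  simp only [pvStepA, pvInd]
  by_cases hA : b = 'A' <;> by_cases hT : b = 'T' <;> by_cases hG : b = 'G' <;>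
    by_cases hC : b = 'C' <;> simp_all

theorem foldA_eq (cs : List Char) (an gn tn cn : List Int) :
    cs.foldl pvStepA (an, gn, tn, cn) =
      (an ++ cs.map (pvInd 'A'), gn ++ cs.map (pvInd 'G'),
       tn ++ cs.map (pvInd 'T'), cn ++ cs.map (pvInd 'C')) := by
  induction cs generalizing an gn tn cn with
  | nil => simp
  | cons b rest ih =>
    simp only [List.foldl_cons, pvStepA_eq, ih, List.map_cons]
    simp

theorem pvUnzip4_rows (cs : List Char) :
    pvUnzip4 (cs.map (fun base => "AGTC".toList.map (fun c => if base == c then (1 : Int) else 0))) =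
      (cs.map (pvInd 'A'), cs.map (pvInd 'G'), cs.map (pvInd 'T'), cs.map (pvInd 'C')) := by
  induction cs with
  | nil => simp [pvUnzip4]
  | cons b rest ih =>
    have hl : "AGTC".toList = ['A', 'G', 'T', 'C'] := rfl
    simp only [List.map_cons, pvUnzip4, ih]
    simp only [hl, List.map_cons, List.map_nil, List.getD_cons_zero, List.getD_cons_succ]
    simp [pvInd]

-- ===== VERDICT (by name: the statement is the Claim_ definition above) =====
theorem calc_z_curve_spec : Claim_equal_calc_z_curve := by
  intro s _
  unfold Spec_calc_z_curve calc_z_curve calc_z_curve_alt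
  cases h : s.toList with
  | nil => simp
  | cons b rest =>
    have hrows : (b :: rest).map (fun base => "AGTC".toList.map (fun c => if base == c then (1 : Int) else 0)) ≠ [] := by simp
    simp only [foldA_eq, List.nil_append]
    rw [if_neg hrows, pvUnzip4_rows]
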